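-- pv_equiv track=rewrite | github.com/yamasampo/conspospy | conspospy/conspos.py | encode_seq_pos
-- ===== SOURCE A (Python) =====
-- def encode_seq_pos(seq_list):
--     pos = 0
--     gap_pos = -1
--     pos_list = []
--     for s in seq_list:
--         gap_str = '-' * len(s)
--         # Append -1 if gap, otherwise append position and increment
--         if s == gap_str:
--             pos_list.append(gap_pos)
--             continue
--         pos_list.append(pos)
--         pos += 1
--     return pos_list
-- ===== SOURCE B (Python) =====
-- def encode_seq_pos(seq_list):
--     # Table-first two-pass: flag list, prefix counts, then one zip to read off positions.
--     nongap = [0 if s == '-' * len(s) else 1 for s in seq_list]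
--     prefix = []
--     total = 0
--     for f in nongap:
--         total += f
--         prefix.append(total)
--     return [p - 1 if f else -1 for f, p in zip(nongap, prefix)]
-- ===== Notes on version B (the rewrite author's own statement) =====
-- stated objective: alternative
-- what changed: Replaces the single pass with a mutable position counter and branch-and-continue by a table-first decomposition: a 0/1 non-gap flag list, a cumulative prefix-count list, and a final zip that reads each position off as prefix-1 (or -1 for gaps).
import Mathlib
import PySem

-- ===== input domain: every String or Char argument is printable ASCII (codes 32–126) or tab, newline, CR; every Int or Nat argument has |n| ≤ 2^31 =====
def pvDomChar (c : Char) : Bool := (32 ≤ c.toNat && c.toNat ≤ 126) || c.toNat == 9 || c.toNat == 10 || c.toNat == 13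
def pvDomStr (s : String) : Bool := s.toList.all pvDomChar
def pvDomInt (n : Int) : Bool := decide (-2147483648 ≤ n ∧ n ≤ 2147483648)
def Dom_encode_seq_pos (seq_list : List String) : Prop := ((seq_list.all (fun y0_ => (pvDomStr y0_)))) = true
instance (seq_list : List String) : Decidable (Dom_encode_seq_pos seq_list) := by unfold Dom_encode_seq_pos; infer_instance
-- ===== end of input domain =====

-- B replaces A's single mutable-counter pass by a table-first decomposition (flag list, prefix counts, zip); same cost, alternative structure.


-- ===== PORT A =====
def encode_seq_pos (seq_list : List String) : List Int :=
  (seq_list.foldl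
    (fun (st : Int × List Int) s =>
      let gap_str := String.ofList (List.replicate s.toList.length '-')
      if s == gap_str then (st.1, st.2 ++ [(-1 : Int)])
      else (st.1 + 1, st.2 ++ [st.1]))
    (0, [])).2

-- ===== PORT B =====
def encode_seq_pos_alt (seq_list : List String) : List Int :=
  let nongap : List Int := seq_list.map (fun s =>
    if s == String.ofList (List.replicate s.toList.length '-') then (0 : Int) else 1)
  let prefs : List Int :=
    (nongap.foldl (fun (st : Int × List Int) f => (st.1 + f, st.2 ++ [st.1 + f])) (0, [])).2
  (nongap.zip prefs).map (fun fp => if fp.1 ≠ 0 then fp.2 - 1 else (-1 : Int))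

-- ===== PRECONDITION & SPEC =====
def Spec_encode_seq_pos (seq_list : List String) (out : List Int) : Prop := out = encode_seq_pos_alt seq_list
instance (seq_list : List String) (out : List Int) : Decidable (Spec_encode_seq_pos seq_list out) := by unfold Spec_encode_seq_pos; infer_instance

-- ===== CLAIM (what is proved, stated in full; the proofs are below) =====
def Claim_equal_encode_seq_pos : Prop := ∀ (seq_list : List String), Dom_encode_seq_pos seq_list → Spec_encode_seq_pos seq_list (encode_seq_pos seq_list)

-- ===== LEMMAS AND PROOFS =====

-- Reference recursion: A's loop starting at position p.
def pvEnc (p : Int) : List String → List Int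
  | [] => []
  | s :: r =>
    if s = String.ofList (List.replicate s.toList.length '-') then (-1 : Int) :: pvEnc p r
    else p :: pvEnc (p + 1) r

-- Reference prefix sums starting from t.
def pvPref (t : Int) : List Int → List Int
  | [] => []
  | f :: r => (t + f) :: pvPref (t + f) r

theorem pvFoldlA (seq : List String) : ∀ (p : Int) (acc : List Int),
    (seq.foldl
      (fun (st : Int × List Int) s =>
        let gap_str := String.ofList (List.replicate s.toList.length '-')
        if s == gap_str then (st.1, st.2 ++ [(-1 : Int)])
        else (st.1 + 1, st.2 ++ [st.1]))
      (p, acc)).2 = acc ++ pvEnc p seq := by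
  induction seq with
  | nil => intro p acc; simp [pvEnc]
  | cons s r ih =>
    intro p acc
    simp only [beq_iff_eq] at ih
    simp only [List.foldl_cons, beq_iff_eq, pvEnc]
    by_cases h : s = String.ofList (List.replicate s.toList.length '-')
    · rw [if_pos h, if_pos h, ih]; simp
    · rw [if_neg h, if_neg h, ih]; simp

theorem pvFoldlP (fs : List Int) : ∀ (t : Int) (acc : List Int),
    (fs.foldl (fun (st : Int × List Int) f => (st.1 + f, st.2 ++ [st.1 + f])) (t, acc)).2
      = acc ++ pvPref t fs := by
  induction fs with
  | nil => intro t acc; simp [pvPref]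
  | cons f r ih => intro t acc; simp [List.foldl, pvPref, ih]

theorem pvZipEnc (seq : List String) : ∀ (t : Int),
    ((seq.map (fun s =>
        if s == String.ofList (List.replicate s.toList.length '-') then (0 : Int) else 1)).zip
      (pvPref t (seq.map (fun s =>
        if s == String.ofList (List.replicate s.toList.length '-') then (0 : Int) else 1)))).map
      (fun fp => if fp.1 ≠ 0 then fp.2 - 1 else (-1 : Int)) = pvEnc t seq := by
  induction seq with
  | nil => intro t; simp [pvEnc]
  | cons s r ih =>
    intro t
    simp only [List.map_cons, beq_iff_eq, pvEnc]
    by_cases h : s = String.ofList (List.replicate s.toList.length '-')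
    · rw [if_pos h, if_pos h]
      simp only [pvPref, List.zip_cons_cons, List.map_cons, add_zero, List.cons.injEq]
      exact ⟨by simp, by simpa using ih t⟩
    · rw [if_neg h, if_neg h]
      simp only [pvPref, List.zip_cons_cons, List.map_cons, List.cons.injEq]
      exact ⟨by norm_num, by simpa using ih (t + 1)⟩

-- ===== VERDICT (by name: the statement is the Claim_ definition above) =====
theorem encode_seq_pos_spec : Claim_equal_encode_seq_pos := by
  intro seq _
  unfold Spec_encode_seq_pos encode_seq_pos encode_seq_pos_alt
  simp only [pvFoldlA, pvFoldlP, pvZipEnc, List.nil_append]
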